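-- pv_equiv track=rewrite | github.com/zhichaoxu-shufe/Semantic-Enhanced-BPER | preprocess.py | name2id
-- ===== SOURCE A (Python) =====
-- def name2id(ids):
-- 	user2id, item2id = {}, {}
-- 	user_count, item_count = 0, 0
-- 	for entry in ids:
-- 		if entry['user'] not in user2id.keys():
-- 			user2id[entry['user']] = user_count
-- 			user_count += 1
-- 		if entry['item'] not in item2id.keys():
-- 			item2id[entry['item']] = item_count
-- 			item_count += 1
-- 	return user2id, item2id
-- ===== SOURCE B (Python) =====
-- def name2id(ids):
-- 	ids = list(ids)
-- 	ufirst, ifirst = {}, {}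
-- 	for pos, entry in enumerate(ids):
-- 		ufirst.setdefault(entry['user'], pos)
-- 		ifirst.setdefault(entry['item'], pos)
-- 	user2id = {u: r for r, u in enumerate(sorted(ufirst, key=ufirst.get))}
-- 	item2id = {t: r for r, t in enumerate(sorted(ifirst, key=ifirst.get))}
-- 	return user2id, item2id
-- ===== Notes on version B (the rewrite author's own statement) =====
-- stated objective: alternative
-- what changed: Instead of A's online membership-checked counters, B records each key's first-occurrence position with setdefault in one enumerated pass, then sorts the keys by that position and assigns ids by rank (sorted+enumerate).
import Mathlib
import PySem

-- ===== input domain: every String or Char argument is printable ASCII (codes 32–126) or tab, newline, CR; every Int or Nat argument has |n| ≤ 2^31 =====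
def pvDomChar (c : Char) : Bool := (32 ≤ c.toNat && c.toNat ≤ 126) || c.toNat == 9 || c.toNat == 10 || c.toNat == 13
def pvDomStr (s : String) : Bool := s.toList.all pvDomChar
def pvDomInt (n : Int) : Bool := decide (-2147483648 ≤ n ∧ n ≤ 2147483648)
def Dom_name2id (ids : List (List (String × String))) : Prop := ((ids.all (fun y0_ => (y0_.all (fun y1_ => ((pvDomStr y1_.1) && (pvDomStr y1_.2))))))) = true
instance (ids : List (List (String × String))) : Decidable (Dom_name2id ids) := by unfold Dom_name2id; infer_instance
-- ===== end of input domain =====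

-- B replaces A's online membership-checked counters by a first-occurrence-position map, then sorts keys by that position and ranks them; equal return values (objective: alternative).

-- entry['user'] on the assoc list: first match (total form; Pre_ guarantees the key is present)
def pvLook (e : List (String × String)) (k : String) : String := (List.lookup k e).getD ""

-- ===== PORT A =====
def name2id (ids : List (List (String × String))) : (List (String × Int)) × (List (String × Int)) :=
  let st := ids.foldl (fun (s : PySem.Dict String Int × PySem.Dict String Int × Int × Int) entry =>
    let (u2i, i2i, uc, ic) := s
    let (u2i, uc) := if u2i.contains (pvLook entry "user") then (u2i, uc)
                     else (u2i.insert (pvLook entry "user") uc, uc + 1)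
    let (i2i, ic) := if i2i.contains (pvLook entry "item") then (i2i, ic)
                     else (i2i.insert (pvLook entry "item") ic, ic + 1)
    (u2i, i2i, uc, ic)) (PySem.Dict.empty, PySem.Dict.empty, 0, 0)
  (st.1.items, st.2.1.items)

-- ===== PORT B =====
def name2id_alt (ids : List (List (String × String))) : (List (String × Int)) × (List (String × Int)) :=
  let st := (PySem.List.enumerate ids 0).foldl
    (fun (s : PySem.Dict String Int × PySem.Dict String Int) pe =>
      (s.1.setdefault (pvLook pe.2 "user") pe.1, s.2.setdefault (pvLook pe.2 "item") pe.1))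
    (PySem.Dict.empty, PySem.Dict.empty)
  let uks := PySem.List.sorted st.1.keys (fun k => st.1.getD k 0) false
  let iks := PySem.List.sorted st.2.keys (fun k => st.2.getD k 0) false
  ((PySem.List.enumerate uks 0).map (fun p => (p.2, p.1)),
   (PySem.List.enumerate iks 0).map (fun p => (p.2, p.1)))

-- ===== PRECONDITION & SPEC =====
-- Pre_ excludes exactly the entries on which Python A raises KeyError: an entry missing the 'user' or 'item' key.
def Pre_name2id (ids : List (List (String × String))) : Prop :=
  ∀ e ∈ ids, (List.lookup "user" e).isSome ∧ (List.lookup "item" e).isSome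
instance (ids : List (List (String × String))) : Decidable (Pre_name2id ids) := by unfold Pre_name2id; infer_instance
def pvWitness_name2id : (List (List (String × String))) := [[("user", "a"), ("item", "x")], [("user", "b"), ("item", "x")]]

def Spec_name2id (ids : List (List (String × String))) (out : (List (String × Int)) × (List (String × Int))) : Prop := out = name2id_alt ids
instance (ids : List (List (String × String))) (out : (List (String × Int)) × (List (String × Int))) : Decidable (Spec_name2id ids out) := by unfold Spec_name2id; infer_instance

-- ===== CLAIM (what is proved, stated in full; the proofs are below) =====
def Claim_equal_name2id : Prop := ∀ (ids : List (List (String × String))), Dom_name2id ids → Pre_name2id ids → Spec_name2id ids (name2id ids)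

-- ===== LEMMAS AND PROOFS =====

-- the dict A maintains for one of the two keys, as a function of the dedup list built so far
def pvEnum (ds : List String) : PySem.Dict String Int :=
  PySem.Dict.mk ((PySem.List.enumerate ds 0).map (fun p => (p.2, p.1)))

def pvStep (s : PySem.Dict String Int × Int) (u : String) : PySem.Dict String Int × Int :=
  if s.1.contains u then s else (s.1.insert u s.2, s.2 + 1)

theorem pvEnum_keys (ds : List String) : (pvEnum ds).keys = ds := by
  rw [pvEnum, PySem.Dict.keys, List.map_map]
  have : ((fun (x : String × Int) => x.1) ∘ fun (p : Int × String) => (p.2, p.1)) = (fun p => p.2) := rfl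
  rw [this, PySem.List.map_snd_enumerate]

theorem pvEnum_contains (ds : List String) (u : String) :
    (pvEnum ds).contains u = decide (u ∈ ds) := by
  rw [PySem.Dict.contains_eq_decide_mem_keys, pvEnum_keys]

theorem pvStep_enum (ds : List String) (u : String) :
    pvStep (pvEnum ds, (ds.length : Int)) u =
      (pvEnum (PySem.Set.add ds u), ((PySem.Set.add ds u).length : Int)) := by
  unfold pvStep PySem.Set.add
  simp only [pvEnum_contains, PySem.Set.contains]
  by_cases h : u ∈ ds
  · simp [h]
  · simp only [h, decide_false, if_false, List.elem_eq_mem, Bool.false_eq_true]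
    have hni : (pvEnum ds).contains u = false := by rw [pvEnum_contains]; simp [h]
    have : (pvEnum ds).insert u (ds.length : Int) =
        PySem.Dict.mk ((pvEnum ds).items ++ [(u, (ds.length : Int))]) := by
      have := PySem.Dict.items_insert_of_not_contains (d := pvEnum ds)
        (k := u) (v := (ds.length : Int)) hni
      exact PySem.Dict.ext this
    rw [this]
    simp [pvEnum, PySem.List.enumerate_append]

theorem pvFold_enum (us : List String) (ds : List String) :
    us.foldl pvStep (pvEnum ds, (ds.length : Int)) =
      (pvEnum (us.foldl PySem.Set.add ds), ((us.foldl PySem.Set.add ds).length : Int)) := by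
  induction us generalizing ds with
  | nil => rfl
  | cons u us ih => rw [List.foldl_cons, pvStep_enum, List.foldl_cons]; exact ih _

-- A's fold splits into the two independent pvStep folds over the mapped key lists
theorem pvSplit (ids : List (List (String × String)))
    (su : PySem.Dict String Int × Int) (si : PySem.Dict String Int × Int) :
    ids.foldl (fun (s : PySem.Dict String Int × PySem.Dict String Int × Int × Int) entry =>
      let (u2i, i2i, uc, ic) := s
      let (u2i, uc) := if u2i.contains (pvLook entry "user") then (u2i, uc)
                       else (u2i.insert (pvLook entry "user") uc, uc + 1)
      let (i2i, ic) := if i2i.contains (pvLook entry "item") then (i2i, ic)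
                       else (i2i.insert (pvLook entry "item") ic, ic + 1)
      (u2i, i2i, uc, ic)) (su.1, si.1, su.2, si.2) =
    (((ids.map (fun e => pvLook e "user")).foldl pvStep su).1,
     ((ids.map (fun e => pvLook e "item")).foldl pvStep si).1,
     ((ids.map (fun e => pvLook e "user")).foldl pvStep su).2,
     ((ids.map (fun e => pvLook e "item")).foldl pvStep si).2) := by
  induction ids generalizing su si with
  | nil => rfl
  | cons e ids ih =>
    simp only [List.foldl_cons, List.map_cons]
    rw [← ih (pvStep su (pvLook e "user")) (pvStep si (pvLook e "item"))]
    simp [pvStep]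

-- ---- B side ----

-- B's setdefault pass over one key stream, on the enumerated list
def pvSd (d : PySem.Dict String Int) (p : Int × String) : PySem.Dict String Int :=
  d.setdefault p.2 p.1

-- invariant for B's first-occurrence map: values listed in key order are < s and strictly increasing
def pvGood (d : PySem.Dict String Int) (s : Int) : Prop :=
  d.keys.Pairwise (fun a b => d.getD a 0 < d.getD b 0) ∧ ∀ k ∈ d.keys, d.getD k 0 < s

theorem pvSd_keys (d : PySem.Dict String Int) (p : Int × String) :
    (pvSd d p).keys = PySem.Set.add d.keys p.2 := by
  unfold pvSd PySem.Set.add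
  by_cases h : d.contains p.2 = true
  · rw [PySem.Dict.setdefault_of_contains d _ h]
    simp [PySem.Set.contains, (PySem.Dict.contains_iff_mem_keys d p.2).mp h]
  · have h' : d.contains p.2 = false := by simpa using h
    rw [PySem.Dict.setdefault_of_not_contains d _ h']
    have hnm : p.2 ∉ d.keys := fun hm => h ((PySem.Dict.contains_iff_mem_keys d p.2).mpr hm)
    simp [PySem.Set.contains, hnm, PySem.Dict.keys_insert_of_not_contains d p.1 h']
  
theorem pvGood_step (d : PySem.Dict String Int) (s : Int) (u : String) (hg : pvGood d s) :
    pvGood (pvSd d (s, u)) (s + 1) := by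
  obtain ⟨hp, hlt⟩ := hg
  unfold pvSd
  by_cases h : d.contains u = true
  · rw [PySem.Dict.setdefault_of_contains d _ h]
    exact ⟨hp, fun k hk => lt_trans (hlt k hk) (by omega)⟩
  · have h' : d.contains u = false := by simpa using h
    rw [PySem.Dict.setdefault_of_not_contains d _ h']
    have hnm : u ∉ d.keys := fun hm => h ((PySem.Dict.contains_iff_mem_keys d u).mpr hm)
    have hkeys : (d.insert u s).keys = d.keys ++ [u] := PySem.Dict.keys_insert_of_not_contains d s h'
    have hvu : (d.insert u s).getD u 0 = s := PySem.Dict.getD_insert_self d u s 0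
    have hvo : ∀ k ∈ d.keys, (d.insert u s).getD k 0 = d.getD k 0 := by
      intro k hk
      exact PySem.Dict.getD_insert_of_ne d s 0 (fun he => hnm (he ▸ hk))
    constructor
    · rw [hkeys]
      refine List.pairwise_append.mpr ⟨?_, ?_, ?_⟩
      · exact List.Pairwise.imp_of_mem (fun {a b} ha hb hab => by
          rw [hvo a ha, hvo b hb]; exact hab) hp
      · simp
      · intro a ha b hb
        simp at hb; subst hb
        rw [hvo a ha, hvu]; exact hlt a ha
    · intro k hk
      rw [hkeys] at hk
      rcases List.mem_append.mp hk with hk | hk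
      · rw [hvo k hk]; exact lt_trans (hlt k hk) (by omega)
      · simp at hk; subst hk; rw [hvu]; omega

theorem pvSdFold (us : List String) (d : PySem.Dict String Int) (s : Int) (hg : pvGood d s) :
    ((PySem.List.enumerate us s).foldl pvSd d).keys = us.foldl PySem.Set.add d.keys ∧
      pvGood ((PySem.List.enumerate us s).foldl pvSd d) (s + us.length) := by
  induction us generalizing d s with
  | nil => exact ⟨rfl, by simpa using hg⟩
  | cons u us ih =>
    rw [PySem.List.enumerate_cons, List.foldl_cons, List.foldl_cons]
    have hg' := pvGood_step d s u hg
    obtain ⟨h1, h2⟩ := ih (pvSd d (s, u)) (s + 1) hg'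
    refine ⟨by rw [h1, pvSd_keys], ?_⟩
    have : s + 1 + (us.length : Int) = s + (u :: us).length := by simp; omega
    rwa [this] at h2

-- a pvGood dict's keys are already sorted by their positions, so B's sort is the identity
theorem pvSorted_keys (d : PySem.Dict String Int) (s : Int) (hg : pvGood d s) :
    PySem.List.sorted d.keys (fun k => d.getD k 0) false = d.keys :=
  PySem.List.sorted_eq_of_perm_of_pairwise_lt d.keys d.keys (fun k => d.getD k 0)
    (List.Perm.refl _) hg.1

-- B's pair fold over the enumerated entries is the two pvSd folds over the enumerated key lists
theorem pvBFold (ids : List (List (String × String))) (s : Int)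
    (a b : PySem.Dict String Int) :
    (PySem.List.enumerate ids s).foldl
      (fun (st : PySem.Dict String Int × PySem.Dict String Int) pe =>
        (st.1.setdefault (pvLook pe.2 "user") pe.1, st.2.setdefault (pvLook pe.2 "item") pe.1))
      (a, b) =
      ((PySem.List.enumerate (ids.map (fun e => pvLook e "user")) s).foldl pvSd a,
       (PySem.List.enumerate (ids.map (fun e => pvLook e "item")) s).foldl pvSd b) := by
  induction ids generalizing s a b with
  | nil => rfl
  | cons e ids ih =>
    rw [List.map_cons, List.map_cons, PySem.List.enumerate_cons, PySem.List.enumerate_cons,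
      PySem.List.enumerate_cons, List.foldl_cons, List.foldl_cons, List.foldl_cons]
    exact ih _ _ _

-- ===== VERDICT (by name: the statement is the Claim_ definition above) =====
theorem name2id_spec : Claim_equal_name2id := by
  intro ids _ _
  show name2id ids = name2id_alt ids
  unfold name2id name2id_alt
  -- A side
  have hsplit := pvSplit ids (PySem.Dict.empty, 0) (PySem.Dict.empty, 0)
  have he : (PySem.Dict.empty, (0 : Int)) = (pvEnum [], (([] : List String).length : Int)) := rfl
  simp only [he] at hsplit
  rw [pvFold_enum, pvFold_enum] at hsplit
  simp only [hsplit]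
  -- B side
  rw [pvBFold ids 0 PySem.Dict.empty PySem.Dict.empty]
  have hk0 : (PySem.Dict.empty : PySem.Dict String Int).keys = [] := rfl
  have hg0 : pvGood PySem.Dict.empty 0 := ⟨by rw [hk0]; exact List.Pairwise.nil, by rw [hk0]; simp⟩
  obtain ⟨hku, hgu⟩ := pvSdFold (ids.map (fun e => pvLook e "user")) PySem.Dict.empty 0 hg0
  obtain ⟨hki, hgi⟩ := pvSdFold (ids.map (fun e => pvLook e "item")) PySem.Dict.empty 0 hg0
  rw [pvSorted_keys _ _ hgu, pvSorted_keys _ _ hgi, hku, hki]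
  rfl
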